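-- pv_equiv track=rewrite | github.com/pmhalvor/fgsa | code/utils.py | decode_mask_target
-- ===== SOURCE A (Python) =====
-- def decode_mask_target(labels, mask):
--     """
--     Parameters:
--         labels (list): single row of data containing labels to decode
--         ignore_id (int): defaults to 0, since 0 excluded from evaluation? TODO check this
--
--     Encodings
--
--         Value       Label
--         0           O                \n
--         5       B-Positive           \n
--         6       I-Positive           \n
--         7       B-Negative           \n
--         8       I-Negative           \n
--
--     """
--     def append_all(e, h, p, t):
--         expressions.append(e)
--         holders.append(h)
--         polarity.append(p)
--         targets.append(t)
--
--     expressions, holders, polarity, targets = [], [], [], []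
--
--     for ele, m in zip(labels, mask):
--         if m == 0:
--             break
--         elif ele == 0:
--             append_all(0, 0, 0, 0)  # outside
--         elif ele == 1:
--             append_all(0, 0, 1, 1)  # polarity 1  target 1
--         elif ele == 2:
--             append_all(0, 0, 1, 2)  # polarity 1  target 2
--         elif ele == 3:
--             append_all(0, 0, 2, 1)  # polarity 2  target 1
--         elif ele == 4:
--             append_all(0, 0, 2, 2)  # polarity 2  target 2
--         else:
--             append_all(0, 0, 0, 0)
--
--     return expressions, holders, polarity, targets
-- ===== SOURCE B (Python) =====
-- def decode_mask_target(labels, mask):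
--     L = 0
--     n = min(len(labels), len(mask))
--     while L < n and mask[L] != 0:
--         L += 1
--     prefix = labels[:L]
--     zeros = [0] * L
--     polarity = [(e + 1) // 2 if 1 <= e <= 4 else 0 for e in prefix]
--     targets = [((e - 1) % 2) + 1 if 1 <= e <= 4 else 0 for e in prefix]
--     return zeros, list(zeros), polarity, targets
-- ===== Notes on version B (the rewrite author's own statement) =====
-- stated objective: simpler
-- what changed: Replaces the six-way elif chain with a single loop over the branch table: first computes the effective length L (first mask==0, capped at the shorter list), then emits [0]*L for expressions/holders and closed-form arithmetic (e+1)//2 and (e-1)%2+1 over labels[:L] for polarity/targets.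
import Mathlib
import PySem

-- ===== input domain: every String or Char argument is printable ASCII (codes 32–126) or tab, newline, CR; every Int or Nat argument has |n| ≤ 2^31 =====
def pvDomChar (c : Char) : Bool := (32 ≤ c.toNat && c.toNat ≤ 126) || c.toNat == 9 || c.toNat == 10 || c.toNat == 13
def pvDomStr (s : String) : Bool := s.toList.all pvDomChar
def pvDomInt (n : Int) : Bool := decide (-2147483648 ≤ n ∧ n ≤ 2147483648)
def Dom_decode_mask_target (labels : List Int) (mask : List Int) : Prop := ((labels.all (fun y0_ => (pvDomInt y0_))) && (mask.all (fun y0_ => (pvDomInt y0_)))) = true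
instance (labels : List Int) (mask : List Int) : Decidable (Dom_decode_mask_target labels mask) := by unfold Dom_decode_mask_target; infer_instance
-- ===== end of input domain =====

-- B replaces A's six-way elif chain by computing the effective length L and
-- filling the four lists with [0]*L and closed-form arithmetic; objective: simpler.

-- ===== PORT A =====
-- the for-loop over zip(labels, mask) with break, branch chain in Python's order
def decode_mask_target_loop : List (Int × Int) → List Int × List Int × List Int × List Int
  | [] => ([], [], [], [])
  | (ele, m) :: rest =>
    if m = 0 then ([], [], [], [])
    else
      let (e, h, p, t) := decode_mask_target_loop rest
      if ele = 0 then (0 :: e, 0 :: h, 0 :: p, 0 :: t)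
      else if ele = 1 then (0 :: e, 0 :: h, 1 :: p, 1 :: t)
      else if ele = 2 then (0 :: e, 0 :: h, 1 :: p, 2 :: t)
      else if ele = 3 then (0 :: e, 0 :: h, 2 :: p, 1 :: t)
      else if ele = 4 then (0 :: e, 0 :: h, 2 :: p, 2 :: t)
      else (0 :: e, 0 :: h, 0 :: p, 0 :: t)

def decode_mask_target (labels : List Int) (mask : List Int) : List Int × List Int × List Int × List Int :=
  decode_mask_target_loop (labels.zip mask)

-- ===== PORT B =====
-- the while-loop computing L (stops at first mask element = 0, capped at the shorter list)
def decode_mask_target_len : List Int → List Int → Nat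
  | [], _ => 0
  | _, [] => 0
  | _ :: ls, m :: ms => if m = 0 then 0 else 1 + decode_mask_target_len ls ms

def decode_mask_target_alt (labels : List Int) (mask : List Int) : List Int × List Int × List Int × List Int :=
  let L := decode_mask_target_len labels mask
  let pre := labels.take L
  let zeros : List Int := List.replicate L 0
  let polarity := pre.map (fun e => if 1 ≤ e ∧ e ≤ 4 then PySem.Int.floordiv (e + 1) 2 else 0)
  let targets := pre.map (fun e => if 1 ≤ e ∧ e ≤ 4 then PySem.Int.mod (e - 1) 2 + 1 else 0)
  (zeros, zeros, polarity, targets)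

-- ===== PRECONDITION & SPEC =====
def Spec_decode_mask_target (labels : List Int) (mask : List Int) (out : List Int × List Int × List Int × List Int) : Prop := out = decode_mask_target_alt labels mask
instance (labels : List Int) (mask : List Int) (out : List Int × List Int × List Int × List Int) : Decidable (Spec_decode_mask_target labels mask out) := by unfold Spec_decode_mask_target; infer_instance

-- ===== CLAIM (what is proved, stated in full; the proofs are below) =====
def Claim_equal_decode_mask_target : Prop := ∀ (labels : List Int) (mask : List Int), Dom_decode_mask_target labels mask → Spec_decode_mask_target labels mask (decode_mask_target labels mask)

-- ===== LEMMAS AND PROOFS =====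

theorem decode_mask_target_alt_cons (ele m : Int) (ls ms : List Int) (hm : m ≠ 0) :
    decode_mask_target_alt (ele :: ls) (m :: ms) =
      ((0 : Int) :: (decode_mask_target_alt ls ms).1,
       (0 : Int) :: (decode_mask_target_alt ls ms).2.1,
       (if 1 ≤ ele ∧ ele ≤ 4 then PySem.Int.floordiv (ele + 1) 2 else 0) :: (decode_mask_target_alt ls ms).2.2.1,
       (if 1 ≤ ele ∧ ele ≤ 4 then PySem.Int.mod (ele - 1) 2 + 1 else 0) :: (decode_mask_target_alt ls ms).2.2.2) := by
  simp [decode_mask_target_alt, decode_mask_target_len, hm, Nat.add_comm 1,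
    List.replicate_succ, List.take_succ_cons]

theorem decode_mask_target_eq (labels mask : List Int) :
    decode_mask_target labels mask = decode_mask_target_alt labels mask := by
  induction labels generalizing mask with
  | nil =>
    cases mask <;>
      simp [decode_mask_target, decode_mask_target_alt, decode_mask_target_len,
        decode_mask_target_loop]
  | cons ele ls ih =>
    cases mask with
    | nil =>
      simp [decode_mask_target, decode_mask_target_alt, decode_mask_target_len,
        decode_mask_target_loop]
    | cons m ms =>
      by_cases hm : m = 0
      · simp [decode_mask_target, decode_mask_target_alt, decode_mask_target_len,
          decode_mask_target_loop, hm]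
      · have ihe := ih ms
        simp only [decode_mask_target] at ihe
        rw [decode_mask_target_alt_cons ele m ls ms hm]
        simp only [decode_mask_target, List.zip_cons_cons, decode_mask_target_loop,
          if_neg hm, ihe]
        by_cases h0 : ele = 0
        · simp [h0]
        · by_cases h1 : ele = 1
          · norm_num [h1, PySem.Int.floordiv, PySem.Int.mod]
          · by_cases h2 : ele = 2
            · norm_num [h2, PySem.Int.floordiv, PySem.Int.mod]
              decide
            · by_cases h3 : ele = 3
              · norm_num [h3, PySem.Int.floordiv, PySem.Int.mod]
                decide
              · by_cases h4 : ele = 4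
                · norm_num [h4, PySem.Int.floordiv, PySem.Int.mod]
                  decide
                · have hni : ¬ (1 ≤ ele ∧ ele ≤ 4) := by omega
                  simp [h0, h1, h2, h3, h4, hni]

-- ===== VERDICT (by name: the statement is the Claim_ definition above) =====
theorem decode_mask_target_spec : Claim_equal_decode_mask_target := by
  intro labels mask _
  unfold Spec_decode_mask_target
  exact decode_mask_target_eq labels mask
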